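-- pv_equiv track=rewrite | github.com/AkhobTornike/MAchineLearning | Week_1/main.py | work_twentyone
-- ===== SOURCE A (Python) =====
-- def work_twentyone(num1, num2):
--     list1 = []
--     list2 = []
--     for i in range(1, num1, 1):
--         if num1 % i == 0:
--             list1.append(i)
--
--     for i in range(1, num2, 1):
--         if num2 % i == 0:
--             list2.append(i)
--     return max([element for element in list1 if element in list2])
-- ===== SOURCE B (Python) =====
-- def work_twentyone(num1, num2):
--     # Euclid's gcd, then: the answer is the largest common divisor that is
--     # proper for both numbers, i.e. gcd itself if gcd < min(num1, num2),
--     # otherwise gcd divided by its smallest factor >= 2.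
--     a, b = num1, num2
--     while b:
--         a, b = b, a % b
--     g = a
--     if g < min(num1, num2):
--         return g
--     e = 2
--     while g % e:
--         e += 1
--     return g // e
-- ===== Notes on version B (the rewrite author's own statement) =====
-- stated objective: faster
-- what changed: Replaces the two full divisor-enumeration loops plus quadratic list intersection by Euclid's gcd followed by one trial-division scan for the gcd's smallest factor.
import Mathlib
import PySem

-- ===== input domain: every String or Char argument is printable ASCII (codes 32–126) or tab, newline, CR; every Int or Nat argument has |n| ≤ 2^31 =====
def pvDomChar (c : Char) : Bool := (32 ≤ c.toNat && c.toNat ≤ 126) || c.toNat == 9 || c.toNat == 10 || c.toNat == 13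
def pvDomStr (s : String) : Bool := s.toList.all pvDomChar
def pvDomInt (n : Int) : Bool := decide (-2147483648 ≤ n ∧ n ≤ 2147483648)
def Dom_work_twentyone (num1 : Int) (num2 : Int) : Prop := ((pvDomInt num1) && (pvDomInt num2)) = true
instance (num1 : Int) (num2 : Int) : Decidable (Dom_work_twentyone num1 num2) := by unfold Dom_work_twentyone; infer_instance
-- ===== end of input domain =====

-- B replaces A's two divisor-enumeration loops and list intersection by Euclid's gcd
-- plus one trial-division scan (objective: faster; measured).

-- ===== PORT A =====
-- literal port: build list1, list2 of proper divisors, intersect, take max.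
-- Python's max raises on an empty list; Pre_ excludes exactly those inputs, so .getD 0 is never the value used.
def work_twentyone (num1 : Int) (num2 : Int) : Int :=
  let list1 := (PySem.List.pyRange 1 num1 1).foldl
    (fun acc i => if PySem.Int.mod num1 i = 0 then acc ++ [i] else acc) []
  let list2 := (PySem.List.pyRange 1 num2 1).foldl
    (fun acc i => if PySem.Int.mod num2 i = 0 then acc ++ [i] else acc) []
  (PySem.List.max? (list1.filter (fun e => decide (e ∈ list2))) (fun y => y)).getD 0

-- ===== PORT B =====
-- 'while b: a, b = b, a % b'  (Python floor mod)
lemma pvMod_natAbs_lt (a b : Int) (hb : b ≠ 0) :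
    (PySem.Int.mod a b).natAbs < b.natAbs := by
  rcases lt_trichotomy b 0 with h | h | h
  · have := PySem.Int.mod_neg_bounds (a:=a) h
    omega
  · exact absurd h hb
  · have h1 := PySem.Int.mod_nonneg (a:=a) h
    have h2 := PySem.Int.mod_lt (a:=a) h
    omega

def pvEuclid (a b : Int) : Int :=
  if _hb : b = 0 then a else pvEuclid b (PySem.Int.mod a b)
termination_by b.natAbs
decreasing_by exact pvMod_natAbs_lt a b _hb

-- 'e = 2; while g % e: e += 1'  (the '|g| + 2 ≤ e' test only makes the loop total:
-- it can fire only for g = ±1, exactly where the Python loop never terminates)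
def pvSpf (g : Int) (e : Int) : Int :=
  if PySem.Int.mod g e = 0 then e
  else if (g.natAbs : Int) + 2 ≤ e then e
  else pvSpf g (e + 1)
termination_by ((g.natAbs : Int) + 2 - e).toNat
decreasing_by omega

def work_twentyone_alt (num1 : Int) (num2 : Int) : Int :=
  let g := pvEuclid num1 num2
  if g < min num1 num2 then g
  else PySem.Int.floordiv g (pvSpf g 2)

-- ===== PRECONDITION & SPEC =====
-- Pre_ is exactly where Python A returns: for num1 ≤ 1 or num2 ≤ 1 a divisor list is
-- empty, so max([]) raises ValueError.
def Pre_work_twentyone (num1 : Int) (num2 : Int) : Prop := 2 ≤ num1 ∧ 2 ≤ num2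
instance (num1 : Int) (num2 : Int) : Decidable (Pre_work_twentyone num1 num2) := by
  unfold Pre_work_twentyone; infer_instance

def pvWitness_work_twentyone : Int × Int := (12, 18)

def Spec_work_twentyone (num1 : Int) (num2 : Int) (out : Int) : Prop := out = work_twentyone_alt num1 num2
instance (num1 : Int) (num2 : Int) (out : Int) : Decidable (Spec_work_twentyone num1 num2 out) := by unfold Spec_work_twentyone; infer_instance

-- ===== CLAIM (what is proved, stated in full; the proofs are below) =====
def Claim_equal_work_twentyone : Prop := ∀ (num1 : Int) (num2 : Int), Dom_work_twentyone num1 num2 → Pre_work_twentyone num1 num2 → Spec_work_twentyone num1 num2 (work_twentyone num1 num2)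

-- ===== LEMMAS AND PROOFS =====

-- r is the greatest common divisor of n1 and n2 that is proper for both
def GCPD (n1 n2 r : Int) : Prop :=
  (1 ≤ r ∧ r ∣ n1 ∧ r ∣ n2 ∧ r < n1 ∧ r < n2) ∧
  (∀ d : Int, 1 ≤ d → d ∣ n1 → d ∣ n2 → d < n1 → d < n2 → d ≤ r)

lemma GCPD_unique {n1 n2 r s : Int} (hr : GCPD n1 n2 r) (hs : GCPD n1 n2 s) : r = s := by
  obtain ⟨⟨hr1, hr2, hr3, hr4, hr5⟩, hrmax⟩ := hr
  obtain ⟨⟨hs1, hs2, hs3, hs4, hs5⟩, hsmax⟩ := hs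
  have h1 := hrmax s hs1 hs2 hs3 hs4 hs5
  have h2 := hsmax r hr1 hr2 hr3 hr4 hr5
  omega

lemma max_getD_GCPD (num1 num2 : Int) (L : List Int)
    (hmem : ∀ x : Int, x ∈ L ↔ (1 ≤ x ∧ x ∣ num1 ∧ x ∣ num2 ∧ x < num1 ∧ x < num2))
    (h1L : (1 : Int) ∈ L) :
    GCPD num1 num2 ((PySem.List.max? L (fun y => y)).getD 0) := by
  obtain ⟨m, hm⟩ : ∃ m, PySem.List.max? L (fun y => y) = some m := by
    cases h : PySem.List.max? L (fun y => y) with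
    | none =>
      rw [PySem.List.max?_eq_none_iff] at h
      rw [h] at h1L
      exact absurd h1L (List.not_mem_nil)
    | some m => exact ⟨m, rfl⟩
  rw [hm, Option.getD_some]
  refine ⟨(hmem m).mp (PySem.List.max?_mem hm), ?_⟩
  intro d hd1 hd2 hd3 hd4 hd5
  exact PySem.List.max?_isMax hm d ((hmem d).mpr ⟨hd1, hd2, hd3, hd4, hd5⟩)

lemma A_is_GCPD (num1 num2 : Int) (h1 : 2 ≤ num1) (h2 : 2 ≤ num2) :
    GCPD num1 num2 (work_twentyone num1 num2) := by
  unfold work_twentyone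
  rw [PySem.List.foldl_append_ite_eq_filter, PySem.List.foldl_append_ite_eq_filter]
  simp only [List.nil_append]
  apply max_getD_GCPD
  · intro x
    simp only [List.mem_filter, PySem.List.mem_pyRange_one, decide_eq_true_eq,
      PySem.Int.mod_eq_zero_iff_dvd]
    tauto
  · simp only [List.mem_filter, PySem.List.mem_pyRange_one, decide_eq_true_eq,
      PySem.Int.mod_eq_zero_iff_dvd]
    exact ⟨⟨⟨le_rfl, by omega⟩, one_dvd _⟩, ⟨⟨le_rfl, by omega⟩, one_dvd _⟩⟩

lemma pvEuclid_spec : ∀ (b a : Int), 0 < a → 0 ≤ b →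
    0 < pvEuclid a b ∧ pvEuclid a b ∣ a ∧ pvEuclid a b ∣ b ∧
    (∀ d : Int, d ∣ a → d ∣ b → d ∣ pvEuclid a b) := by
  have key : ∀ n : Nat, ∀ b a : Int, b.natAbs ≤ n → 0 < a → 0 ≤ b →
      0 < pvEuclid a b ∧ pvEuclid a b ∣ a ∧ pvEuclid a b ∣ b ∧
      (∀ d : Int, d ∣ a → d ∣ b → d ∣ pvEuclid a b) := by
    intro n
    induction n with
    | zero =>
      intro b a hn ha hb
      have hb0 : b = 0 := by omega
      subst hb0
      rw [pvEuclid]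
      simp only [↓reduceDIte]
      exact ⟨ha, dvd_refl a, dvd_zero a, fun d hd _ => hd⟩
    | succ n ih =>
      intro b a hn ha hb
      by_cases hb0 : b = 0
      · subst hb0
        rw [pvEuclid]
        simp only [↓reduceDIte]
        exact ⟨ha, dvd_refl a, dvd_zero a, fun d hd _ => hd⟩
      · have hbpos : 0 < b := by omega
        rw [pvEuclid, dif_neg hb0]
        have hr0 : 0 ≤ PySem.Int.mod a b := PySem.Int.mod_nonneg a hbpos
        have hrlt : PySem.Int.mod a b < b := PySem.Int.mod_lt a hbpos
        obtain ⟨hpos, hd1, hd2, hmax⟩ :=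
          ih (PySem.Int.mod a b) b (by omega) hbpos hr0
        have heq := PySem.Int.floordiv_mul_add_mod a b
        refine ⟨hpos, ?_, hd1, ?_⟩
        · have hdvd : pvEuclid b (PySem.Int.mod a b) ∣
              (PySem.Int.floordiv a b * b + PySem.Int.mod a b) :=
            dvd_add (Dvd.dvd.mul_left hd1 _) hd2
          rwa [heq] at hdvd
        · intro d hda hdb
          apply hmax d hdb
          have : PySem.Int.mod a b = a - PySem.Int.floordiv a b * b := by omega
          rw [this]
          exact dvd_sub hda (Dvd.dvd.mul_left hdb _)
  exact fun b a ha hb => key b.natAbs b a le_rfl ha hb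

lemma pvSpf_spec (g : Int) : ∀ (e : Int), 2 ≤ e → e ≤ g →
    pvSpf g e ∣ g ∧ e ≤ pvSpf g e ∧
    (∀ k : Int, e ≤ k → k < pvSpf g e → ¬ k ∣ g) := by
  have key : ∀ n : Nat, ∀ e : Int, (g - e).toNat ≤ n → 2 ≤ e → e ≤ g →
      pvSpf g e ∣ g ∧ e ≤ pvSpf g e ∧
      (∀ k : Int, e ≤ k → k < pvSpf g e → ¬ k ∣ g) := by
    intro n
    induction n with
    | zero =>
      intro e hn he heg
      have heq : e = g := by omega
      rw [pvSpf, if_pos ((PySem.Int.mod_eq_zero_iff_dvd g e).mpr (by rw [heq]))]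
      exact ⟨by rw [heq], le_rfl, fun k hk1 hk2 => (by omega : False).elim⟩
    | succ n ih =>
      intro e hn he heg
      rw [pvSpf]
      by_cases hdvd : PySem.Int.mod g e = 0
      · rw [if_pos hdvd]
        exact ⟨(PySem.Int.mod_eq_zero_iff_dvd g e).mp hdvd, le_rfl,
          fun k hk1 hk2 => (by omega : False).elim⟩
      · have hlt : e < g := by
          rcases lt_or_eq_of_le heg with h | h
          · exact h
          · exact absurd ((PySem.Int.mod_eq_zero_iff_dvd g e).mpr (h ▸ dvd_refl g)) hdvd
        rw [if_neg hdvd, if_neg (by omega : ¬ ((g.natAbs : Int) + 2 ≤ e))]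
        obtain ⟨ha, hb2, hc⟩ := ih (e + 1) (by omega) (by omega) (by omega)
        refine ⟨ha, by omega, ?_⟩
        intro k hk1 hk2
        rcases eq_or_lt_of_le hk1 with h | h
        · subst h
          exact fun hkd => hdvd ((PySem.Int.mod_eq_zero_iff_dvd g e).mpr hkd)
        · exact hc k (by omega) hk2
  exact fun e he heg => key (g - e).toNat e le_rfl he heg

lemma B_is_GCPD (num1 num2 : Int) (h1 : 2 ≤ num1) (h2 : 2 ≤ num2) :
    GCPD num1 num2 (work_twentyone_alt num1 num2) := by
  unfold work_twentyone_alt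
  obtain ⟨hgpos, hgd1, hgd2, hgmax⟩ := pvEuclid_spec num2 num1 (by omega) (by omega)
  set g := pvEuclid num1 num2 with hgdef
  by_cases hcase : g < min num1 num2
  · rw [if_pos hcase]
    have hgl1 : g < num1 := lt_of_lt_of_le hcase (min_le_left _ _)
    have hgl2 : g < num2 := lt_of_lt_of_le hcase (min_le_right _ _)
    refine ⟨⟨by omega, hgd1, hgd2, hgl1, hgl2⟩, ?_⟩
    intro d hd1 hd2 hd3 _ _
    exact Int.le_of_dvd hgpos (hgmax d hd2 hd3)
  · rw [if_neg hcase]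
    have hgle1 : g ≤ num1 := Int.le_of_dvd (by omega) hgd1
    have hgle2 : g ≤ num2 := Int.le_of_dvd (by omega) hgd2
    have hgeq : g = min num1 num2 :=
      le_antisymm (le_min hgle1 hgle2) (not_lt.mp hcase)
    have hg2 : 2 ≤ g := hgeq ▸ le_min h1 h2
    obtain ⟨hed, he2, hemin⟩ := pvSpf_spec g 2 le_rfl hg2
    set e := pvSpf g 2 with hedef
    have hepos : 0 < e := by omega
    obtain ⟨c, hc⟩ := hed
    have hfd : PySem.Int.floordiv g e = c := by
      rw [PySem.Int.floordiv_eq_ediv_of_pos hepos, hc]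
      exact Int.mul_ediv_cancel_left c (by omega)
    rw [hfd]
    have hcpos : 0 < c := by nlinarith
    have hclt : c < g := by nlinarith
    have hcg : c ∣ g := ⟨e, by rw [hc, mul_comm]⟩
    refine ⟨⟨by omega, dvd_trans hcg hgd1, dvd_trans hcg hgd2, by omega, by omega⟩, ?_⟩
    intro d hd1 hdn1 hdn2 hdlt1 hdlt2
    have hdg : d ∣ g := hgmax d hdn1 hdn2
    have hdltg : d < g := hgeq ▸ lt_min hdlt1 hdlt2
    obtain ⟨c', hc'⟩ := hdg
    have hc'2 : 2 ≤ c' := by nlinarith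
    have hc'g : c' ∣ g := ⟨d, by rw [hc', mul_comm]⟩
    have hec' : e ≤ c' := by
      by_contra h
      exact hemin c' hc'2 (by omega) hc'g
    nlinarith

-- ===== VERDICT (by name: the statement is the Claim_ definition above) =====
theorem work_twentyone_spec : Claim_equal_work_twentyone := by
  intro num1 num2 _ hpre
  unfold Spec_work_twentyone
  exact GCPD_unique (A_is_GCPD num1 num2 hpre.1 hpre.2) (B_is_GCPD num1 num2 hpre.1 hpre.2)
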